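-- pv_equiv track=rewrite | github.com/Semihalf/uefi | csr-tool/csr_utils.py | rangeToString
-- ===== SOURCE A (Python) =====
-- def rangeToString(range_list):
--     result = []
--     for arg_ranges in range_list:
--         result.append("(")
--         for rmin,rmax in arg_ranges:
--             if result[-1] != "(":
--                 result.append(", ")
--             result.append("%d" % rmin)
--             if rmin != rmax:
--                 result.append("..%d" % rmax)
--         result.append(")")
--     return "".join(result)
-- ===== SOURCE B (Python) =====
-- def rangeToString(range_list):
--     # Pure structural recursion producing the string directly: no token buffer,
--     # no join, no sentinel peek -- each helper returns its remainder of the output.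
--     def item(r):
--         rmin, rmax = r
--         return "%d" % rmin if rmin == rmax else "%d..%d" % (rmin, rmax)
--     def rest(items):
--         return "" if not items else ", " + item(items[0]) + rest(items[1:])
--     def group(items):
--         return "()" if not items else "(" + item(items[0]) + rest(items[1:]) + ")"
--     def go(groups):
--         return "" if not groups else group(groups[0]) + go(groups[1:])
--     return go(range_list)
-- ===== Notes on version B (the rewrite author's own statement) =====
-- stated objective: alternative
-- what changed: Replaces A's flat token buffer with its result[-1] != "(" sentinel peek and final join by pure structural recursion (go/group/rest helpers), each call returning its remainder of the output string directly with no intermediate list.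
import Mathlib
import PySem

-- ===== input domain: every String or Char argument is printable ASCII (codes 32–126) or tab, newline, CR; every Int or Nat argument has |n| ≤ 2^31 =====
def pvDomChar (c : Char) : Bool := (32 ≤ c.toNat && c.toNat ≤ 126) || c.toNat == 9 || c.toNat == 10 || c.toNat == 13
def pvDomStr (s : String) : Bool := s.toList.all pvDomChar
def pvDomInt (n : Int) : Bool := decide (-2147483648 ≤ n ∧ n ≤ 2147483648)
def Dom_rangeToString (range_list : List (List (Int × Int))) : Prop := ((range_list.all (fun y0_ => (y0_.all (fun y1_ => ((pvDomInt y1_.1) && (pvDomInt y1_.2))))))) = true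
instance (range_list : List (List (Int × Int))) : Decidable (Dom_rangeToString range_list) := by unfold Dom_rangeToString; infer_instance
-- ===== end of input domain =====

-- B replaces A's flat token buffer with its result[-1] != "(" sentinel peek and final
-- join by pure structural recursion returning each remainder of the output directly.

-- ===== PORT A =====
-- one inner-loop iteration of A (result[-1] is read with pyGet?; at every call site
-- result is nonempty — "(" was just appended — so the `.getD ""` default is unreachable
-- and the port is exact)
def stepA (result : List String) (p : Int × Int) : List String :=
  let result := if ((PySem.List.pyGet? result (-1)).getD "") ≠ "(" then result ++ [", "] else result
  let result := result ++ [PySem.Int.toStr p.1]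
  if p.1 ≠ p.2 then result ++ [".." ++ PySem.Int.toStr p.2] else result

def rangeToString (range_list : List (List (Int × Int))) : String :=
  PySem.Str.join ""
    (range_list.foldl (fun result arg_ranges =>
      (arg_ranges.foldl stepA (result ++ ["("])) ++ [")"]) [])

-- ===== PORT B =====
def fmtItem (r : Int × Int) : String :=
  if r.1 == r.2 then PySem.Int.toStr r.1
  else PySem.Int.toStr r.1 ++ ".." ++ PySem.Int.toStr r.2

def restB : List (Int × Int) → String
  | [] => ""
  | p :: items => ", " ++ fmtItem p ++ restB items

def groupB : List (Int × Int) → String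
  | [] => "()"
  | p :: items => "(" ++ fmtItem p ++ restB items ++ ")"

def goB : List (List (Int × Int)) → String
  | [] => ""
  | g :: groups => groupB g ++ goB groups

def rangeToString_alt (range_list : List (List (Int × Int))) : String :=
  goB range_list

-- ===== PRECONDITION & SPEC =====
def Spec_rangeToString (range_list : List (List (Int × Int))) (out : String) : Prop := out = rangeToString_alt range_list
instance (range_list : List (List (Int × Int))) (out : String) : Decidable (Spec_rangeToString range_list out) := by unfold Spec_rangeToString; infer_instance

-- ===== CLAIM (what is proved, stated in full; the proofs are below) =====
def Claim_equal_rangeToString : Prop := ∀ (range_list : List (List (Int × Int))), Dom_rangeToString range_list → Spec_rangeToString range_list (rangeToString range_list)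

-- ===== LEMMAS AND PROOFS =====

-- the strings A appends for one (rmin, rmax) pair
def pieces (p : Int × Int) : List String :=
  if p.1 ≠ p.2 then [PySem.Int.toStr p.1, ".." ++ PySem.Int.toStr p.2]
  else [PySem.Int.toStr p.1]

-- the strings A's inner loop appends for a whole group
def itemsFlat : List (Int × Int) → List String
  | [] => []
  | p :: rest => pieces p ++ rest.flatMap (fun q => ", " :: pieces q)

theorem digitChar_ne_paren (m : Nat) : Nat.digitChar m ≠ '(' := by
  by_cases h : m < 16
  · interval_cases m <;> decide
  · have h2 : Nat.digitChar m = '*' := by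
      rw [Nat.digitChar.eq_def]
      repeat rw [if_neg (by omega)]
    rw [h2]; decide

theorem mem_toDigitsCore (b : Nat) :
    ∀ (f n : Nat) (acc : List Char) (c : Char), c ∈ Nat.toDigitsCore b f n acc →
      c ∈ acc ∨ ∃ m, c = Nat.digitChar m := by
  intro f
  induction f with
  | zero => intro n acc c h; exact Or.inl h
  | succ f ih =>
    intro n acc c h
    simp only [Nat.toDigitsCore] at h
    by_cases hb : n / b = 0
    · rw [if_pos hb] at h
      rcases List.mem_cons.mp h with h | h
      · exact Or.inr ⟨n % b, h⟩
      · exact Or.inl h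
    · rw [if_neg hb] at h
      rcases ih (n / b) (Nat.digitChar (n % b) :: acc) c h with h' | h'
      · rcases List.mem_cons.mp h' with h2 | h2
        · exact Or.inr ⟨n % b, h2⟩
        · exact Or.inl h2
      · exact Or.inr h'

theorem toStr_ne_paren (n : Int) : PySem.Int.toStr n ≠ "(" := by
  intro h
  have h2 := congrArg String.toList h
  rw [PySem.Int.toList_toStr] at h2
  have hp : String.toList "(" = ['('] := by decide
  rw [hp] at h2
  unfold PySem.Int.toChars at h2
  split_ifs at h2 with hn
  · have hh : '-' = '(' := by injection h2
    exact absurd hh (by decide)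
  · have hmem : '(' ∈ Nat.toDigits 10 n.toNat := by
      rw [h2]; exact List.mem_singleton.mpr rfl
    unfold Nat.toDigits at hmem
    rcases mem_toDigitsCore 10 _ _ _ _ hmem with h' | ⟨m, hm⟩
    · simp at h'
    · exact absurd hm.symm (digitChar_ne_paren m)

theorem dots_ne_paren (n : Int) : ".." ++ PySem.Int.toStr n ≠ "(" := by
  intro h
  have h2 := congrArg String.toList h
  rw [String.toList_append] at h2
  have e1 : (".." : String).toList = ['.', '.'] := by decide
  have e2 : ("(" : String).toList = ['('] := by decide
  rw [e1, e2] at h2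
  have hh : '.' = '(' := by injection h2
  exact absurd hh (by decide)

theorem pieces_last (p : Int × Int) :
    ∃ init t, pieces p = init ++ [t] ∧ t ≠ "(" := by
  unfold pieces
  split_ifs with h
  · exact ⟨[PySem.Int.toStr p.1], ".." ++ PySem.Int.toStr p.2, rfl, dots_ne_paren p.2⟩
  · exact ⟨[], PySem.Int.toStr p.1, rfl, toStr_ne_paren p.1⟩

theorem pyLast (xs : List String) (s : String) :
    (PySem.List.pyGet? (xs ++ [s]) (-1)).getD "" = s := by
  simp [PySem.List.pyGet?, PySem.List.pyIdx?]

theorem stepA_last (pre : List String) (s : String) (p : Int × Int) :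
    stepA (pre ++ [s]) p =
      (if s ≠ "(" then pre ++ [s] ++ [", "] else pre ++ [s]) ++ pieces p := by
  unfold stepA pieces
  rw [pyLast]
  split_ifs with h1 h2 h2 <;> simp

theorem foldl_mid : ∀ (g : List (Int × Int)) (pre : List String) (s : String), s ≠ "(" →
    g.foldl stepA (pre ++ [s]) = pre ++ [s] ++ g.flatMap (fun q => ", " :: pieces q) := by
  intro g
  induction g with
  | nil => intro pre s _; simp
  | cons p rest ih =>
    intro pre s hs
    rw [List.foldl_cons, stepA_last]
    rw [if_pos hs]
    obtain ⟨init, t, hpt, ht⟩ := pieces_last p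
    have : pre ++ [s] ++ [", "] ++ pieces p = (pre ++ [s] ++ [", "] ++ init) ++ [t] := by
      rw [hpt]; simp
    rw [this, ih _ _ ht]
    rw [List.flatMap_cons, hpt]
    simp

theorem foldl_fresh (g : List (Int × Int)) (pre : List String) :
    g.foldl stepA (pre ++ ["("]) = pre ++ ["("] ++ itemsFlat g := by
  cases g with
  | nil => simp [itemsFlat]
  | cons p rest =>
    rw [List.foldl_cons, stepA_last]
    simp only [ne_eq, not_true_eq_false, ite_false]
    obtain ⟨init, t, hpt, ht⟩ := pieces_last p
    have : pre ++ ["("] ++ pieces p = (pre ++ ["("] ++ init) ++ [t] := by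
      rw [hpt]; simp
    rw [this, foldl_mid _ _ _ ht]
    simp [itemsFlat, hpt]

theorem outer_fold : ∀ (rl : List (List (Int × Int))) (acc : List String),
    rl.foldl (fun result arg_ranges =>
        (arg_ranges.foldl stepA (result ++ ["("])) ++ [")"]) acc =
      acc ++ rl.flatMap (fun g => "(" :: (itemsFlat g ++ [")"])) := by
  intro rl
  induction rl with
  | nil => intro acc; simp
  | cons g rest ih =>
    intro acc
    rw [List.foldl_cons, foldl_fresh, ih]
    simp

theorem join_nil_flatten (L : List (List Char)) : PySem.Chars.join [] L = L.flatten := by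
  induction L with
  | nil => simp [PySem.Chars.join, List.intercalate]
  | cons a l ih =>
    cases l with
    | nil => simp [PySem.Chars.join, List.intercalate, List.intersperse]
    | cons b l' =>
      simp only [PySem.Chars.join, List.intercalate] at ih ⊢
      rw [show List.intersperse ([] : List Char) (a :: b :: l') =
        a :: [] :: List.intersperse [] (b :: l') from rfl]
      simp_all

theorem piecesChars (q : Int × Int) :
    (List.map String.toList (pieces q)).flatten = (fmtItem q).toList := by
  unfold pieces fmtItem
  by_cases h : q.1 = q.2
  · simp [h]
  · have hb : (q.1 == q.2) = false := by simp [h]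
    simp [h, hb, String.toList_append]

theorem rest_chars : ∀ (rest : List (Int × Int)),
    (List.map String.toList (rest.flatMap (fun q => ", " :: pieces q))).flatten =
      (restB rest).toList := by
  intro rest
  induction rest with
  | nil => simp [restB]
  | cons q r ih =>
    simp only [List.flatMap_cons, List.map_cons, List.map_append, List.flatten_append,
      List.flatten_cons, ih, piecesChars, restB, String.toList_append]

theorem group_chars (g : List (Int × Int)) :
    (List.map String.toList ("(" :: (itemsFlat g ++ [")"]))).flatten = (groupB g).toList := by
  cases g with
  | nil => simp [itemsFlat, groupB]
  | cons p rest =>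
    unfold itemsFlat groupB
    simp only [List.map_cons, List.map_append, List.flatten_cons, List.flatten_append,
      piecesChars, rest_chars, String.toList_append]
    simp

-- ===== VERDICT (by name: the statement is the Claim_ definition above) =====
theorem rangeToString_spec : Claim_equal_rangeToString := by
  intro rl hdom
  clear hdom
  unfold Spec_rangeToString rangeToString rangeToString_alt
  rw [outer_fold]
  rw [← String.toList_inj]
  rw [PySem.Str.toList_join]
  have hnil : ("" : String).toList = [] := by decide
  rw [hnil, join_nil_flatten, List.nil_append]
  induction rl with
  | nil => simp [goB]
  | cons g rest ih =>
    simp only [List.flatMap_cons, List.map_append, List.flatten_append, goB,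
      String.toList_append, ih, group_chars]
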